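-- pv_equiv track=rewrite | github.com/SVCE-ACM/A-December-Of_Algorithms-2024 | December 28/python3_Bershay.py | canArrangeBooks
-- ===== SOURCE A (Python) =====
-- from collections import Counter
--
-- def canArrangeBooks(books, shelfSize):
--     if len(books) % shelfSize != 0:
--         return False
--
--     book_count = Counter(books)
--     books.sort()
--
--     for book in books:
--         if book_count[book] == 0:
--             continue
--
--         for i in range(shelfSize):
--             if book_count[book + i] > 0:
--                 book_count[book + i] -= 1
--             else:
--                 return False
--
--     return True
-- ===== SOURCE B (Python) =====
-- def canArrangeBooks(books, shelfSize):
--     if len(books) % shelfSize != 0: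
--         return False
--     books.sort()
--
--     # run-length encode the sorted books into (value, count) runs
--     runs = []
--     i, n = 0, len(books)
--     while i < n:
--         j = i
--         while j < n and books[j] == books[i]:
--             j += 1
--         runs.append((books[i], j - i))
--         i = j
--
--     # sweep over the runs keeping a sliding window of group openings
--     opened = []   # groups opened at each of the last values of the current consecutive block
--     total = 0     # groups still open ( = sum(opened) )
--     prev = None
--     for v, cnt in runs:
--         if prev is None or v != prev + 1:
--             if total > 0:
--                 return False      # an open group cannot cross a gap
--             opened = []
--         if cnt < total:
--             return False          # not enough copies to continue every open group
--         opened.append(cnt - total)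
--         total = cnt
--         while opened and len(opened) > shelfSize - 1:
--             total -= opened.pop(0)
--         prev = v
--     return total == 0
-- ===== Notes on version B (the rewrite author's own statement) =====
-- stated objective: alternative
-- what changed: B drops the Counter and the per-book window loop entirely: it run-length encodes the sorted list and makes one sliding-window sweep over the distinct values, tracking how many groups are currently open (difference counting) and failing on a gap or a short run, instead of A's greedy that decrements shelfSize counter entries for every individual book.
import Mathlib
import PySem

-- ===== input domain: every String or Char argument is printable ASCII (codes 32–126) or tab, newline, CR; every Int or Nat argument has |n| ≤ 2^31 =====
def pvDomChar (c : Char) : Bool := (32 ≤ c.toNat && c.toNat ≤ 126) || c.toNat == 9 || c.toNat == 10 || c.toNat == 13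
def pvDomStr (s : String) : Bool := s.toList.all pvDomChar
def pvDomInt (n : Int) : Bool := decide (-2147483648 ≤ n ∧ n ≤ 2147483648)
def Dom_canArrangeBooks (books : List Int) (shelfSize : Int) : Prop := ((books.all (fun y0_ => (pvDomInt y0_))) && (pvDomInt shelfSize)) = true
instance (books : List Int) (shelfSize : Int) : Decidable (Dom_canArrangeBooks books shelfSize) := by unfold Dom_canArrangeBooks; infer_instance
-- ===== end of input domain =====

-- B replaces A's per-book greedy counter decrements by a run-length encoding of the
-- sorted list followed by one sliding-window sweep counting currently open groups;
-- objective: alternative algorithm. Both A and B sort `books` in place; the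
-- equivalence proved here is about the return value (the mutation is identical).

-- ===== PORT A =====
-- inner `for i in range(shelfSize)` loop of A: decrement each of v..v+k-1 by one, none = `return False`
def pvInnerA (v : Int) : List Int → PySem.Dict Int Int → Option (PySem.Dict Int Int)
  | [], c => some c
  | i :: is, c =>
    if 0 < c.getD (v + i) 0 then pvInnerA v is (c.insert (v + i) (c.getD (v + i) 0 - 1))
    else none

-- outer `for book in books` loop of A
def pvLoopA (k : Int) : List Int → PySem.Dict Int Int → Bool
  | [], _ => true
  | b :: bs, c =>
    if c.getD b 0 == 0 then pvLoopA k bs c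
    else
      match pvInnerA b (PySem.List.pyRange 0 k 1) c with
      | none => false
      | some c' => pvLoopA k bs c'

def canArrangeBooks (books : List Int) (shelfSize : Int) : Bool :=
  if PySem.Int.mod (books.length : Int) shelfSize ≠ 0 then false
  else pvLoopA shelfSize (PySem.List.sorted books (fun x => x) false) (PySem.Dict.counter books)

-- ===== PORT B =====
-- run-length encoding of the (sorted) list: the inner `while books[j] == books[i]` scan
-- is the takeWhile prefix, `i = j` drops it
def pvRLE : List Int → List (Int × Int)
  | [] => []
  | v :: rest =>
    (v, (1 : Int) + (rest.takeWhile (fun b => b == v)).length) ::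
      pvRLE (rest.drop (rest.takeWhile (fun b => b == v)).length)
termination_by l => l.length
decreasing_by
  simp only [List.length_drop, List.length_cons]
  omega

-- `while opened and len(opened) > shelfSize - 1: total -= opened.pop(0)`
def pvTrim (k : Int) : List Int → Int → List Int × Int
  | [], total => ([], total)
  | o :: rest, total =>
    if k - 1 < ((o :: rest).length : Int) then pvTrim k rest (total - o)
    else (o :: rest, total)

-- `for v, cnt in runs:` sweep of Source B
def pvSweepGo (k : Int) : List (Int × Int) → List Int → Int → Option Int → Bool
  | [], _, total, _ => total == 0
  | (v, c) :: rs, opened, total, prev =>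
    let gap : Bool := match prev with | none => true | some p => decide (¬ v = p + 1)
    if gap && decide (0 < total) then false
    else
      let opened1 := if gap then [] else opened
      if c < total then false
      else
        let st := pvTrim k (opened1 ++ [c - total]) c
        pvSweepGo k rs st.1 st.2 (some v)

def canArrangeBooks_alt (books : List Int) (shelfSize : Int) : Bool :=
  if PySem.Int.mod (books.length : Int) shelfSize ≠ 0 then false
  else pvSweepGo shelfSize (pvRLE (PySem.List.sorted books (fun x => x) false)) [] 0 none

-- ===== PRECONDITION & SPEC =====
-- Pre_ excludes only shelfSize = 0, on which `len(books) % shelfSize` raises ZeroDivisionError in A (and in B).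
def Pre_canArrangeBooks (books : List Int) (shelfSize : Int) : Prop := shelfSize ≠ 0
instance (books : List Int) (shelfSize : Int) : Decidable (Pre_canArrangeBooks books shelfSize) := by unfold Pre_canArrangeBooks; infer_instance

def pvWitness_canArrangeBooks : List Int × Int := ([1, 2], 2)

def Spec_canArrangeBooks (books : List Int) (shelfSize : Int) (out : Bool) : Prop := out = canArrangeBooks_alt books shelfSize
instance (books : List Int) (shelfSize : Int) (out : Bool) : Decidable (Spec_canArrangeBooks books shelfSize out) := by unfold Spec_canArrangeBooks; infer_instance

-- ===== CLAIM (what is proved, stated in full; the proofs are below) =====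
def Claim_equal_canArrangeBooks : Prop := ∀ (books : List Int) (shelfSize : Int), Dom_canArrangeBooks books shelfSize → Pre_canArrangeBooks books shelfSize → Spec_canArrangeBooks books shelfSize (canArrangeBooks books shelfSize)

-- ===== LEMMAS AND PROOFS =====

-- Abstraction of A's loops over plain functions Int → Int (the counter seen through getD · 0).
def pvSub (v : Int) (offs : List Int) (n : Int) (f : Int → Int) : Int → Int :=
  fun x => if x ∈ offs.map (fun i => v + i) then f x - n else f x

def pvDecsA (v : Int) : List Int → (Int → Int) → Option (Int → Int)
  | [], f => some f
  | i :: is, f =>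
    if 0 < f (v + i) then pvDecsA v is (Function.update f (v + i) (f (v + i) - 1)) else none

def pvRunA (k : Int) : List Int → (Int → Int) → Bool
  | [], _ => true
  | b :: bs, f =>
    if f b = 0 then pvRunA k bs f
    else
      match pvDecsA b (PySem.List.pyRange 0 k 1) f with
      | none => false
      | some f' => pvRunA k bs f'

-- runs-level bulk greedy: the common middle form between A's greedy and B's sweep
def pvBulk (k : Int) : List (Int × Int) → (Int → Int) → Bool
  | [], _ => true
  | (v, _) :: rs, f =>
    if f v = 0 then pvBulk k rs f
    else if ∀ i ∈ PySem.List.pyRange 0 k 1, f v ≤ f (v + i) then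
      pvBulk k rs (pvSub v (PySem.List.pyRange 0 k 1) (f v) f)
    else false

-- multiplicity of x in a runs list
def pvCnt : List (Int × Int) → Int → Int
  | [], _ => 0
  | (v, c) :: rs, x => (if x = v then c else 0) + pvCnt rs x

-- how many open groups of window W still cover value x
def pvCov (k : Int) (W : List (Int × Int)) (x : Int) : Int :=
  (W.map (fun p => if x - k < p.1 then p.2 else 0)).sum

def intsFrom : Int → Nat → List Int
  | _, 0 => []
  | s, n + 1 => s :: intsFrom (s + 1) n

-- ghost (value-carrying) version of pvTrim
def pvTrimW (k : Int) : List (Int × Int) → List (Int × Int)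
  | [] => []
  | p :: rest => if k - 1 < ((p :: rest).length : Int) then pvTrimW k rest else p :: rest

def pvAfter (prev : Option Int) (x : Int) : Prop := ∀ q, prev = some q → q < x

-- bridges: the Dict loops compute exactly the function loops
theorem pvInnerA_bridge (v : Int) (offs : List Int) (c : PySem.Dict Int Int) :
    Option.map (fun d x => PySem.Dict.getD d x 0) (pvInnerA v offs c)
      = pvDecsA v offs (fun x => c.getD x 0) := by
  induction offs generalizing c with
  | nil => rfl
  | cons i is ih =>
    simp only [pvInnerA, pvDecsA]
    split
    · rw [ih]
      congr 1
      funext x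
      rw [PySem.Dict.getD_insert, Function.update_apply]
    · rfl

theorem pvLoopA_bridge (k : Int) (bs : List Int) (c : PySem.Dict Int Int) :
    pvLoopA k bs c = pvRunA k bs (fun x => c.getD x 0) := by
  induction bs generalizing c with
  | nil => rfl
  | cons b bs ih =>
    simp only [pvLoopA, pvRunA, beq_iff_eq]
    split
    · exact ih c
    · have h := pvInnerA_bridge b (PySem.List.pyRange 0 k 1) c
      cases hA : pvInnerA b (PySem.List.pyRange 0 k 1) c with
      | none => rw [hA] at h; rw [← h]; rfl
      | some c' => rw [hA] at h; rw [← h]; exact ih c'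

-- characterization of A's inner loop
theorem pvDecsA_char (v : Int) (offs : List Int) (f : Int → Int) (hnd : offs.Nodup) :
    pvDecsA v offs f
      = if ∀ i ∈ offs, 0 < f (v + i) then some (pvSub v offs 1 f) else none := by
  induction offs generalizing f with
  | nil =>
    rw [if_pos (by simp)]
    have h : pvSub v [] 1 f = f := by funext x; simp [pvSub]
    rw [h]
    rfl
  | cons i is ih =>
    rcases List.nodup_cons.mp hnd with ⟨hi, hnd'⟩
    have heq : ∀ i' ∈ is, Function.update f (v + i) (f (v + i) - 1) (v + i') = f (v + i') := by
      intro i' hi'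
      apply Function.update_of_ne
      intro h
      have hii : i' = i := by omega
      exact hi (hii ▸ hi')
    simp only [pvDecsA]
    by_cases h0 : 0 < f (v + i)
    · rw [if_pos h0, ih _ hnd']
      by_cases hall : ∀ i' ∈ is, 0 < f (v + i')
      · have hall' : ∀ i' ∈ is, 0 < Function.update f (v + i) (f (v + i) - 1) (v + i') := by
          intro i' hi'
          rw [heq i' hi']
          exact hall i' hi'
        have hfull : ∀ i' ∈ i :: is, 0 < f (v + i') := by
          intro i' hi'
          rcases List.mem_cons.mp hi' with h | h
          · exact h ▸ h0
          · exact hall i' h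
        rw [if_pos hall', if_pos hfull]
        congr 1
        funext x
        simp only [pvSub, Function.update_apply, List.map_cons, List.mem_cons]
        by_cases hx : x = v + i
        · simp [hx, hi]
        · by_cases hx2 : x ∈ is.map (fun i => v + i) <;> simp [hx, hx2]
      · have h1 : ¬ ∀ i' ∈ is, 0 < Function.update f (v + i) (f (v + i) - 1) (v + i') := by
          intro hc
          exact hall fun i' hi' => by rw [← heq i' hi']; exact hc i' hi'
        have h2 : ¬ ∀ i' ∈ i :: is, 0 < f (v + i') := by
          intro hc
          exact hall fun i' hi' => hc i' (List.mem_cons_of_mem _ hi')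
        rw [if_neg h1, if_neg h2]
    · rw [if_neg h0, if_neg]
      intro hc
      exact h0 (hc i (by simp))

-- skipping a block of already-consumed copies of v
theorem pvRunA_skip (k v : Int) (j : Nat) (t : List Int) (f : Int → Int) (hv : f v = 0) :
    pvRunA k (List.replicate j v ++ t) f = pvRunA k t f := by
  induction j with
  | zero => rfl
  | succ n ih =>
    rw [List.replicate_succ, List.cons_append]
    simp only [pvRunA, hv, if_pos]
    exact ih

-- trivial A loop when shelfSize ≤ 0 (range(shelfSize) is empty)
theorem pvRunA_nonpos (k : Int) (hk : k ≤ 0) (bs : List Int) (f : Int → Int) :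
    pvRunA k bs f = true := by
  induction bs with
  | nil => rfl
  | cons b bs ih =>
    simp only [pvRunA, PySem.List.pyRange_one_eq_nil (a := 0) (b := k) hk, pvDecsA]
    split <;> exact ih

-- a sorted list starting at v is: copies of v, then a sorted tail of strictly larger elements
theorem pvSortedSplit (v : Int) (rest : List Int)
    (h : List.Pairwise (α := Int) (· ≤ ·) (v :: rest)) :
    ∃ (j : Nat) (t : List Int), rest = List.replicate j v ++ t ∧
      List.Pairwise (α := Int) (· ≤ ·) t ∧ ∀ b ∈ t, v < b := by
  induction rest with
  | nil => exact ⟨0, [], rfl, List.Pairwise.nil, by simp⟩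
  | cons b rest' ih =>
    rcases List.pairwise_cons.mp h with ⟨hle, hrest⟩
    by_cases hb : b = v
    · subst hb
      rcases ih hrest with ⟨j, t, he, hp, hgt⟩
      exact ⟨j + 1, t, by simp [he, List.replicate_succ], hp, hgt⟩
    · have hvb : v < b := lt_of_le_of_ne (hle b (by simp)) (Ne.symm hb)
      refine ⟨0, b :: rest', rfl, hrest, ?_⟩
      intro x hx
      rcases List.mem_cons.mp hx with hx | hx
      · omega
      · exact lt_of_lt_of_le hvb ((List.pairwise_cons.mp hrest).1 x hx)

-- A's per-copy greedy on a whole group of equal books equals one bulk step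
theorem pvRunA_group (k v : Int) (hk : 0 < k) :
    ∀ (cnt j : Nat) (t : List Int) (f : Int → Int), f v = (cnt : Int) → 0 < cnt → cnt ≤ j + 1 →
      (∀ x, 0 ≤ f x) →
      pvRunA k (v :: (List.replicate j v ++ t)) f
        = if ∀ i ∈ PySem.List.pyRange 0 k 1, (cnt : Int) ≤ f (v + i)
          then pvRunA k t (pvSub v (PySem.List.pyRange 0 k 1) (cnt : Int) f) else false := by
  intro cnt
  induction cnt with
  | zero => omega
  | succ n ih =>
    intro j t f hv hpos hle hnn
    have hv0 : v ∈ (PySem.List.pyRange 0 k 1).map (fun i => v + i) :=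
      List.mem_map.mpr ⟨0, PySem.List.mem_pyRange_one.mpr ⟨le_refl 0, hk⟩, by omega⟩
    have hnd := PySem.List.nodup_pyRange_one (a := 0) (b := k)
    simp only [pvRunA]
    rw [if_neg (by omega), pvDecsA_char v _ f hnd]
    by_cases hall1 : ∀ i ∈ PySem.List.pyRange 0 k 1, 0 < f (v + i)
    · rw [if_pos hall1]
      show pvRunA k (List.replicate j v ++ t) (pvSub v (PySem.List.pyRange 0 k 1) 1 f) = _
      rcases Nat.eq_zero_or_pos n with hn | hn
      · subst hn
        have hsv : pvSub v (PySem.List.pyRange 0 k 1) 1 f v = 0 := by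
          simp only [pvSub, if_pos hv0]
          omega
        rw [pvRunA_skip k v j t _ hsv,
            if_pos (by intro i hi; have := hall1 i hi; push_cast; omega)]
        congr 1
      · obtain ⟨j', rfl⟩ : ∃ j', j = j' + 1 := ⟨j - 1, by omega⟩
        rw [List.replicate_succ, List.cons_append]
        have hsv : pvSub v (PySem.List.pyRange 0 k 1) 1 f v = (n : Int) := by
          simp only [pvSub, if_pos hv0]
          omega
        rw [ih j' t _ hsv hn (by omega)
            (by intro x
                simp only [pvSub]
                split
                · rename_i hmem
                  rcases List.mem_map.mp hmem with ⟨i, hi, he⟩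
                  have hxe : v + i = x := he
                  rw [← hxe]
                  have := hall1 i hi
                  omega
                · exact hnn x)]
        have hiter : ∀ i ∈ PySem.List.pyRange 0 k 1,
            pvSub v (PySem.List.pyRange 0 k 1) 1 f (v + i) = f (v + i) - 1 := by
          intro i hi
          simp only [pvSub, if_pos (List.mem_map.mpr ⟨i, hi, rfl⟩)]
        by_cases hcond : ∀ i ∈ PySem.List.pyRange 0 k 1, ((n : Int) + 1) ≤ f (v + i)
        · rw [if_pos (by intro i hi; rw [hiter i hi]; have := hcond i hi; omega),
              if_pos (by intro i hi; have := hcond i hi; push_cast; omega)]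
          congr 1
          funext x
          simp only [pvSub]
          split <;> push_cast <;> omega
        · rw [if_neg (by
                intro hc
                exact hcond fun i hi => by
                  have := hc i hi
                  rw [hiter i hi] at this
                  omega),
              if_neg (by
                intro hc
                exact hcond fun i hi => by
                  have := hc i hi
                  push_cast at this
                  omega)]
    · rw [if_neg hall1, if_neg]
      intro hc
      exact hall1 fun i hi => by
        have := hc i hi
        push_cast at this
        omega

-- ===== RLE lemmas =====
theorem pvRLE_peel (v : Int) (j : Nat) (t : List Int) (ht : ∀ b ∈ t, v < b) :
    pvRLE (v :: (List.replicate j v ++ t)) = (v, 1 + (j : Int)) :: pvRLE t := by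
  have htake : (List.replicate j v ++ t).takeWhile (fun b => b == v) = List.replicate j v := by
    induction j with
    | zero =>
      simp only [List.replicate, List.nil_append]
      cases t with
      | nil => rfl
      | cons b t' =>
        have : (b == v) = false := by
          have := ht b (by simp)
          simp only [beq_eq_false_iff_ne, ne_eq]
          omega
        simp [List.takeWhile, this]
    | succ m ih =>
      have h' : ∀ b ∈ t, v < b := ht
      rw [List.replicate_succ, List.cons_append]
      simp only [List.takeWhile, beq_self_eq_true]
      rw [ih]
  rw [pvRLE]
  rw [htake]
  simp [List.length_replicate, List.drop_left']

theorem pvRLE_pos (bs : List Int) : ∀ p ∈ pvRLE bs, 1 ≤ p.2 := by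
  induction bs using pvRLE.induct with
  | case1 => intro p hp; simp [pvRLE] at hp
  | case2 v rest ih =>
    intro p hp
    rw [pvRLE] at hp
    rcases List.mem_cons.mp hp with h | h
    · subst h
      have : (0 : Int) ≤ ((rest.takeWhile (fun b => b == v)).length : Int) :=
        Int.natCast_nonneg _
      simp only []
      omega
    · exact ih p h

theorem pvRLE_mem_fst : ∀ (bs : List Int), ∀ p ∈ pvRLE bs, p.1 ∈ bs := by
  intro bs
  induction bs using pvRLE.induct with
  | case1 => intro p hp; simp [pvRLE] at hp
  | case2 v rest ih =>
    intro p hp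
    rw [pvRLE] at hp
    rcases List.mem_cons.mp hp with h | h
    · subst h; exact List.mem_cons_self
    · exact List.mem_cons_of_mem _ ((List.drop_sublist _ _).mem (ih p h))

theorem pvRLE_sorted_props (n : Nat) :
    ∀ (bs : List Int), bs.length ≤ n → List.Pairwise (α := Int) (· ≤ ·) bs →
      List.Pairwise (fun p q : Int × Int => p.1 < q.1) (pvRLE bs) ∧
      (∀ x, pvCnt (pvRLE bs) x = (bs.count x : Int)) := by
  induction n with
  | zero =>
    intro bs hlen _
    have : bs = [] := List.length_eq_zero_iff.mp (by omega)
    subst this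
    refine ⟨by rw [pvRLE]; exact List.Pairwise.nil, fun x => by rw [pvRLE]; simp [pvCnt]⟩
  | succ n ih =>
    intro bs hlen hsort
    cases bs with
    | nil => refine ⟨by rw [pvRLE]; exact List.Pairwise.nil, fun x => by rw [pvRLE]; simp [pvCnt]⟩
    | cons v rest =>
      rcases pvSortedSplit v rest hsort with ⟨j, t, rfl, hpt, hgt⟩
      have hvt : v ∉ t := fun h => absurd (hgt v h) (by omega)
      have hlent : t.length ≤ n := by
        simp only [List.length_cons, List.length_append, List.length_replicate] at hlen
        omega
      rcases ih t hlent hpt with ⟨hasc, hcnt⟩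
      rw [pvRLE_peel v j t hgt]
      constructor
      · refine List.pairwise_cons.mpr ⟨?_, hasc⟩
        intro q hq
        exact hgt q.1 (pvRLE_mem_fst t q hq)
      · intro x
        have hrc : ((List.replicate j v).count x) = if x = v then j else 0 := by
          rw [List.count_replicate]
          simp only [beq_iff_eq]
          by_cases hx : x = v
          · rw [if_pos hx.symm, if_pos hx]
          · rw [if_neg (fun h => hx h.symm), if_neg hx]
        have hcc : (v :: (List.replicate j v ++ t)).count x
            = (List.replicate j v).count x + t.count x + (if x = v then 1 else 0) := by
          rw [List.count_cons, List.count_append]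
          simp only [beq_iff_eq]
          by_cases hx : x = v
          · rw [if_pos hx.symm, if_pos hx]
          · rw [if_neg (fun h => hx h.symm), if_neg hx]
        simp only [pvCnt, hcnt x, hcc, hrc]
        by_cases hx : x = v
        · subst hx
          rw [List.count_eq_zero.mpr hvt]
          push_cast
          omega
        · simp only [if_neg hx]
          push_cast
          omega

theorem pvMainA (k : Int) (hk : 0 < k) :
    ∀ (n : Nat) (bs : List Int) (f : Int → Int), bs.length ≤ n →
      List.Pairwise (α := Int) (· ≤ ·) bs → (∀ x, 0 ≤ f x) →
      (∀ x, f x ≤ bs.count x) →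
      pvRunA k bs f = pvBulk k (pvRLE bs) f := by
  intro n
  induction n with
  | zero =>
    intro bs f hlen _ _ _
    have : bs = [] := List.length_eq_zero_iff.mp (by omega)
    subst this
    rw [pvRLE]
    rfl
  | succ n ih =>
    intro bs f hlen hsort hnn hcnt
    cases bs with
    | nil => rw [pvRLE]; rfl
    | cons v rest =>
      rcases pvSortedSplit v rest hsort with ⟨j, t, rfl, hpt, hgt⟩
      rw [pvRLE_peel v j t hgt]
      have hvt : v ∉ t := fun h => absurd (hgt v h) (by omega)
      have hcv : (List.replicate j v ++ t).count v = j := by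
        rw [List.count_append, List.count_replicate_self, List.count_eq_zero.mpr hvt]
        omega
      have hcnt_v : f v ≤ (j : Int) + 1 := by
        have := hcnt v
        rw [List.count_cons_self, hcv] at this
        push_cast at this
        omega
      have hcnt_ne : ∀ x, x ≠ v → f x ≤ (t.count x : Int) := by
        intro x hx
        have hrep : (List.replicate j v).count x = 0 := by
          simp [List.count_replicate, Ne.symm hx]
        have := hcnt x
        rw [List.count_cons_of_ne (Ne.symm hx), List.count_append, hrep] at this
        simpa using this
      have hlent : t.length ≤ n := by
        simp only [List.length_cons, List.length_append, List.length_replicate] at hlen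
        omega
      by_cases hv0 : f v = 0
      · have hA : pvRunA k (v :: (List.replicate j v ++ t)) f = pvRunA k t f := by
          simp only [pvRunA, hv0, if_pos]
          exact pvRunA_skip k v j t f hv0
        rw [hA]
        simp only [pvBulk, hv0, if_pos]
        exact ih t f hlent hpt hnn
          (fun x => by
            by_cases hx : x = v
            · subst hx; rw [hv0]; exact Int.natCast_nonneg _
            · exact hcnt_ne x hx)
      · have hfv_pos : 0 < f v := lt_of_le_of_ne (hnn v) (Ne.symm hv0)
        have hfvnat : f v = ((f v).toNat : Int) := (Int.toNat_of_nonneg (hnn v)).symm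
        have hv0mem : v ∈ (PySem.List.pyRange 0 k 1).map (fun i => v + i) :=
          List.mem_map.mpr ⟨0, PySem.List.mem_pyRange_one.mpr ⟨le_refl 0, hk⟩, by omega⟩
        rw [pvRunA_group k v hk (f v).toNat j t f hfvnat (by omega) (by omega) hnn]
        rw [← hfvnat]
        simp only [pvBulk, hv0, if_false]
        by_cases hcond : ∀ i ∈ PySem.List.pyRange 0 k 1, f v ≤ f (v + i)
        · rw [if_pos hcond, if_pos hcond]
          apply ih t _ hlent hpt
          · intro x
            simp only [pvSub]
            split
            · rename_i hmem
              rcases List.mem_map.mp hmem with ⟨i, hi, he⟩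
              have hxe : v + i = x := he
              rw [← hxe]
              have := hcond i hi
              omega
            · exact hnn x
          · intro x
            by_cases hx : x = v
            · rw [hx]
              simp only [pvSub, if_pos hv0mem]
              have h0t : (0 : Int) ≤ (t.count v : Int) := Int.natCast_nonneg _
              omega
            · simp only [pvSub]
              have h1 := hcnt_ne x hx
              have h2 := hfv_pos
              split <;> omega
        · rw [if_neg hcond, if_neg hcond]

-- ===== sweep-side lemmas =====
theorem pvCnt_nonneg (rs : List (Int × Int)) (h : ∀ p ∈ rs, 0 ≤ p.2) (x : Int) :
    0 ≤ pvCnt rs x := by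
  induction rs with
  | nil => simp [pvCnt]
  | cons p rs ih =>
    obtain ⟨v, c⟩ := p
    have h1 : (0 : Int) ≤ c := h (v, c) (by simp)
    have h2 := ih (fun q hq => h q (List.mem_cons_of_mem _ hq))
    simp only [pvCnt]
    split <;> omega

theorem pvCnt_eq_zero (rs : List (Int × Int)) (x : Int) (h : ∀ p ∈ rs, p.1 ≠ x) :
    pvCnt rs x = 0 := by
  induction rs with
  | nil => rfl
  | cons p rs ih =>
    obtain ⟨v, c⟩ := p
    have h1 : v ≠ x := h (v, c) (by simp)
    simp only [pvCnt, if_neg (fun hx : x = v => h1 hx.symm)]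
    rw [ih (fun q hq => h q (List.mem_cons_of_mem _ hq))]
    omega

theorem pvCov_nonneg (k : Int) (W : List (Int × Int)) (h : ∀ p ∈ W, 0 ≤ p.2) (x : Int) :
    0 ≤ pvCov k W x := by
  induction W with
  | nil => simp [pvCov]
  | cons p W ih =>
    have h1 := h p (by simp)
    have h2 := ih (fun q hq => h q (List.mem_cons_of_mem _ hq))
    simp only [pvCov, List.map_cons, List.sum_cons] at *
    split <;> omega

theorem pvCov_le_sum (k : Int) (W : List (Int × Int)) (h : ∀ p ∈ W, 0 ≤ p.2) (x : Int) :
    pvCov k W x ≤ (W.map Prod.snd).sum := by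
  induction W with
  | nil => simp [pvCov]
  | cons p W ih =>
    have h1 := h p (by simp)
    have h2 := ih (fun q hq => h q (List.mem_cons_of_mem _ hq))
    simp only [pvCov, List.map_cons, List.sum_cons] at *
    split <;> omega

theorem pvCov_eq_sum (k : Int) (W : List (Int × Int)) (x : Int)
    (h : ∀ p ∈ W, x - k < p.1) : pvCov k W x = (W.map Prod.snd).sum := by
  induction W with
  | nil => simp [pvCov]
  | cons p W ih =>
    have h1 := h p (by simp)
    have h2 := ih (fun q hq => h q (List.mem_cons_of_mem _ hq))
    simp only [pvCov, List.map_cons, List.sum_cons] at *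
    rw [if_pos h1, h2]

theorem pvCov_append_single (k : Int) (W : List (Int × Int)) (p : Int × Int) (x : Int) :
    pvCov k (W ++ [p]) x = pvCov k W x + (if x - k < p.1 then p.2 else 0) := by
  simp [pvCov]

theorem mem_intsFrom (s : Int) (n : Nat) (u : Int) (h : u ∈ intsFrom s n) :
    s ≤ u ∧ u < s + n := by
  induction n generalizing s with
  | zero => simp [intsFrom] at h
  | succ m ih =>
    rw [intsFrom] at h
    rcases List.mem_cons.mp h with h | h
    · subst h; omega
    · have := ih (s + 1) h
      push_cast
      omega

theorem intsFrom_snoc (s : Int) (n : Nat) :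
    intsFrom s (n + 1) = intsFrom s n ++ [s + n] := by
  induction n generalizing s with
  | zero => simp [intsFrom]
  | succ m ih =>
    rw [intsFrom, ih (s + 1), intsFrom]
    simp only [List.cons_append]
    congr 3
    push_cast
    ring

theorem pvCov_cons (k : Int) (p : Int × Int) (W : List (Int × Int)) (x : Int) :
    pvCov k (p :: W) x = (if x - k < p.1 then p.2 else 0) + pvCov k W x := by
  simp [pvCov]

theorem pvSumSnd_nonneg (W : List (Int × Int)) (h : ∀ p ∈ W, 0 ≤ p.2) :
    0 ≤ (W.map Prod.snd).sum := by
  apply List.sum_nonneg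
  intro x hx
  rcases List.mem_map.mp hx with ⟨p, hp, rfl⟩
  exact h p hp

theorem pvMemWindow (k v x : Int) (hx : v < x) :
    x ∈ (PySem.List.pyRange 0 k 1).map (fun i => v + i) ↔ x - k < v := by
  constructor
  · intro h
    rcases List.mem_map.mp h with ⟨i, hi, he⟩
    rcases PySem.List.mem_pyRange_one.mp hi with ⟨h0, h1⟩
    omega
  · intro h
    exact List.mem_map.mpr ⟨x - v, PySem.List.mem_pyRange_one.mpr ⟨by omega, by omega⟩, by omega⟩

-- pvTrimW keeps a suffix whose window ends at v, is short enough, and covers the same x > v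
theorem pvTrimW_spec (k : Int) (hk : 1 ≤ k) :
    ∀ (W : List (Int × Int)) (v : Int),
      W.map Prod.fst = intsFrom (v + 1 - W.length) W.length →
      (pvTrimW k W).map Prod.fst
          = intsFrom (v + 1 - (pvTrimW k W).length) (pvTrimW k W).length ∧
      ((pvTrimW k W).length : Int) ≤ k - 1 ∧
      (∀ x : Int, v < x → pvCov k (pvTrimW k W) x = pvCov k W x) ∧
      (∀ p ∈ pvTrimW k W, p ∈ W) := by
  intro W
  induction W with
  | nil =>
    intro v _
    refine ⟨rfl, by simp; omega, fun x _ => rfl, fun p hp => hp⟩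
  | cons p rest ih =>
    intro v h
    have hfst : p.1 = v - rest.length := by
      have := congrArg (fun l => l.headD 0) h
      simp only [List.map_cons, List.headD_cons, List.length_cons] at this
      rw [this, intsFrom]
      simp only [List.headD_cons]
      push_cast
      ring
    have hrest : rest.map Prod.fst = intsFrom (v + 1 - rest.length) rest.length := by
      have := congrArg List.tail h
      simp only [List.map_cons, List.tail_cons, List.length_cons] at this
      rw [this, intsFrom]
      simp only [List.tail_cons]
      congr 1
      push_cast
      ring
    rw [pvTrimW]
    split
    · rename_i hlen
      rcases ih v hrest with ⟨h1, h2, h3, h4⟩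
      refine ⟨h1, h2, ?_, fun q hq => List.mem_cons_of_mem _ (h4 q hq)⟩
      intro x hx
      rw [h3 x hx, pvCov_cons, if_neg (by
        simp only [List.length_cons] at hlen
        push_cast at hlen
        omega)]
      omega
    · rename_i hlen
      simp only [List.length_cons] at hlen
      push_cast at hlen
      exact ⟨h, by simp only [List.length_cons]; push_cast; omega, fun x _ => rfl, fun q hq => hq⟩

-- the port's trim computes the ghost trim
theorem pvTrim_bridge (k : Int) :
    ∀ (W : List (Int × Int)) (t : Int),
      pvTrim k (W.map Prod.snd) t
        = ((pvTrimW k W).map Prod.snd,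
           t - ((W.map Prod.snd).sum - ((pvTrimW k W).map Prod.snd).sum)) := by
  intro W
  induction W with
  | nil => intro t; simp [pvTrim, pvTrimW]
  | cons p W ih =>
    intro t
    simp only [List.map_cons, pvTrim, pvTrimW, List.length_cons, List.length_map]
    split
    · rw [ih (t - p.2)]
      simp only [List.sum_cons]
      congr 1
      omega
    · simp only [List.map_cons, List.sum_cons]
      congr 1
      omega

-- for shelfSize < 0 the sweep trims everything away each step and returns true
theorem pvSweep_nonpos (k : Int) (hk : k ≤ 0) :
    ∀ (rs : List (Int × Int)), (∀ p ∈ rs, 0 ≤ p.2) → ∀ prev,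
      pvSweepGo k rs [] 0 prev = true := by
  intro rs
  induction rs with
  | nil => intro _ prev; rfl
  | cons p rs ih =>
    intro h prev
    obtain ⟨v, c⟩ := p
    have hc : (0 : Int) ≤ c := h (v, c) (by simp)
    have hrest := ih (fun q hq => h q (List.mem_cons_of_mem _ hq))
    simp only [pvSweepGo]
    have h1 : (decide ((0:Int) < 0)) = false := by decide
    rw [h1, Bool.and_false]
    simp only [Bool.false_eq_true, if_false]
    rw [if_neg (by omega : ¬ c < (0:Int))]
    simp only [ite_self, List.nil_append, sub_zero]
    rw [pvTrim]
    rw [if_pos (by simp; omega)]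
    rw [pvTrim]
    simp only [sub_self]
    exact hrest (some v)

-- doom: an open group that exceeds the remaining multiplicity forces the sweep to fail
theorem pvDoom (k : Int) (hk : 1 ≤ k) :
    ∀ (rs W : List (Int × Int)) (prev : Option Int),
      ((W.length : Int) ≤ k - 1) →
      (∀ p ∈ W, 0 ≤ p.2) →
      (∀ p : Int, prev = some p → W.map Prod.fst = intsFrom (p + 1 - W.length) W.length) →
      (prev = none → W = []) →
      (∀ p ∈ rs, 1 ≤ p.2) →
      List.Pairwise (fun p q : Int × Int => p.1 < q.1) rs →
      (∀ p ∈ rs, pvAfter prev p.1) →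
      (∃ x, pvAfter prev x ∧ pvCnt rs x < pvCov k W x) →
      pvSweepGo k rs (W.map Prod.snd) ((W.map Prod.snd).sum) prev = false := by
  intro rs
  induction rs with
  | nil =>
    intro W prev hlen hnn _ _ _ _ _ hdoom
    rcases hdoom with ⟨x, _, hdef⟩
    have h1 := pvCov_le_sum k W hnn x
    have h2 : pvCnt [] x = 0 := rfl
    simp only [pvSweepGo, beq_eq_false_iff_ne, ne_eq]
    omega
  | cons q rs ih =>
    intro W prev hlen hnn hfst h0 hcnt hpair hafter hdoom
    obtain ⟨v, c⟩ := q
    rcases hdoom with ⟨x, hax, hdef⟩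
    have hcnt' : ∀ p ∈ rs, 1 ≤ p.2 := fun p hp => hcnt p (List.mem_cons_of_mem _ hp)
    have hhead : ∀ p ∈ rs, v < p.1 := fun p hp => (List.pairwise_cons.mp hpair).1 p hp
    have hpair' := (List.pairwise_cons.mp hpair).2
    cases prev with
    | none =>
      have hW : W = [] := h0 rfl
      subst hW
      exact absurd hdef (by
        have h1 : pvCov k ([] : List (Int × Int)) x = 0 := rfl
        have h2 := pvCnt_nonneg ((v, c) :: rs) (fun p hp => le_trans (by omega) (hcnt p hp)) x
        omega)
    | some p =>
      have hfst' := hfst p rfl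
      by_cases hgap : v = p + 1
      · have hgb : (decide (¬ v = p + 1)) = false := by simp [hgap]
        simp only [pvSweepGo, hgb, Bool.false_and, Bool.false_eq_true, if_false]
        by_cases hclt : c < (W.map Prod.snd).sum
        · rw [if_pos hclt]
        · rw [if_neg hclt]
          have hcrs : pvCnt rs v = 0 :=
            pvCnt_eq_zero rs v (fun q hq => by have := hhead q hq; omega)
          have hxv : x ≠ v := by
            intro h
            subst h
            have h1 : pvCnt ((x, c) :: rs) x = c := by
              show (if x = x then c else 0) + pvCnt rs x = c
              rw [if_pos rfl, hcrs]
              omega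
            have h2 := pvCov_le_sum k W hnn x
            omega
          have hxgt : v < x := by
            have := hax p rfl
            omega
          set S := (W.map Prod.snd).sum with hS
          set W1 := W ++ [(v, c - S)] with hW1
          have hfst1 : W1.map Prod.fst = intsFrom (v + 1 - W1.length) W1.length := by
            rw [hW1, List.map_append, hfst']
            simp only [List.map_cons, List.map_nil]
            have hv : (v : Int) = (p + 1 - (W.length : Int)) + W.length := by omega
            conv_lhs => rw [show ([v] : List Int) = [(p + 1 - (W.length : Int)) + W.length] from by rw [← hv]]
            rw [← intsFrom_snoc]
            simp only [List.length_append, List.length_cons, List.length_nil]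
            congr 1
            push_cast
            omega
          obtain ⟨t1, t2, t3, t4⟩ := pvTrimW_spec k hk W1 v hfst1
          have hTnn : ∀ q ∈ pvTrimW k W1, 0 ≤ q.2 := by
            intro q hq
            rcases List.mem_append.mp (hW1 ▸ t4 q hq) with h | h
            · exact hnn q h
            · simp only [List.mem_cons, List.not_mem_nil, or_false] at h
              subst h
              simp only
              omega
          rw [show W.map Prod.snd ++ [c - S] = W1.map Prod.snd by simp [hW1],
              pvTrim_bridge k W1 c]
          have hsum1 : (W1.map Prod.snd).sum = c := by
            simp only [hW1, List.map_append, List.sum_append, List.map_cons, List.map_nil,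
              List.sum_cons, List.sum_nil, ← hS]
            omega
          simp only [hsum1, sub_sub_cancel]
          apply ih (pvTrimW k W1) (some v) t2 hTnn
            (fun p' hp' => by injection hp' with h; subst h; exact t1)
            (fun h => by cases h)
            hcnt' hpair'
            (fun q hq r hr => by injection hr with h; subst h; exact hhead q hq)
          refine ⟨x, fun r hr => by injection hr with h; omega, ?_⟩
          have hcx : pvCnt ((v, c) :: rs) x = pvCnt rs x := by
            simp only [pvCnt, if_neg hxv]
            omega
          rw [t3 x hxgt, hW1, pvCov_append_single]
          split <;> omega
      · have hgb : (decide (¬ v = p + 1)) = true := by simp [hgap]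
        simp only [pvSweepGo, hgb, Bool.true_and]
        by_cases h0' : 0 < (W.map Prod.snd).sum
        · rw [if_pos (by simpa using h0')]
        · have hS0 : (W.map Prod.snd).sum = 0 :=
            le_antisymm (by omega) (pvSumSnd_nonneg W hnn)
          have hcov0 := pvCov_le_sum k W hnn x
          have hcnt0 := pvCnt_nonneg ((v, c) :: rs) (fun p hp => le_trans (by omega) (hcnt p hp)) x
          omega

-- one run processed: the bulk step equals the sweep step (given the recursion hypothesis)
theorem pvStep (k : Int) (hk : 1 ≤ k) (v c : Int) (rs' W : List (Int × Int)) (f : Int → Int)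
    (hIH : ∀ (W' : List (Int × Int)) (f' : Int → Int),
        ((W'.length : Int) ≤ k - 1) → (∀ p ∈ W', 0 ≤ p.2) →
        (W'.map Prod.fst = intsFrom (v + 1 - W'.length) W'.length) →
        (∀ x, v < x → f' x = pvCnt rs' x - pvCov k W' x) →
        (∀ x, v < x → 0 ≤ f' x) →
        pvBulk k rs' f' = pvSweepGo k rs' (W'.map Prod.snd) ((W'.map Prod.snd).sum) (some v))
    (hrs1 : ∀ p ∈ rs', 1 ≤ p.2)
    (hrs2 : List.Pairwise (fun p q : Int × Int => p.1 < q.1) rs')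
    (hrs3 : ∀ p ∈ rs', v < p.1)
    (hWlen : (W.length : Int) ≤ k - 1)
    (hWnn : ∀ p ∈ W, 0 ≤ p.2)
    (hWfst : W.map Prod.fst = intsFrom (v - W.length) W.length)
    (hfv : f v = c - (W.map Prod.snd).sum)
    (hreg : ∀ x, v < x → f x = pvCnt rs' x - pvCov k W x)
    (hnn : ∀ x, v ≤ x → 0 ≤ f x) :
    pvBulk k ((v, c) :: rs') f
      = pvSweepGo k rs'
          ((pvTrimW k (W ++ [(v, c - (W.map Prod.snd).sum)])).map Prod.snd)
          (((pvTrimW k (W ++ [(v, c - (W.map Prod.snd).sum)])).map Prod.snd).sum) (some v) := by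
  set S := (W.map Prod.snd).sum with hS
  set W1 := W ++ [(v, c - S)] with hW1
  have hfv0 : 0 ≤ f v := hnn v le_rfl
  have hfst1 : W1.map Prod.fst = intsFrom (v + 1 - W1.length) W1.length := by
    rw [hW1, List.map_append, hWfst]
    simp only [List.map_cons, List.map_nil]
    have hv : (v : Int) = (v - (W.length : Int)) + W.length := by omega
    conv_lhs => rw [show ([v] : List Int) = [(v - (W.length : Int)) + W.length] from by rw [← hv]]
    rw [← intsFrom_snoc]
    simp only [List.length_append, List.length_cons, List.length_nil]
    congr 1
    push_cast
    omega
  obtain ⟨t1, t2, t3, t4⟩ := pvTrimW_spec k hk W1 v hfst1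
  have hTnn : ∀ q ∈ pvTrimW k W1, 0 ≤ q.2 := by
    intro q hq
    rcases List.mem_append.mp (hW1 ▸ t4 q hq) with h | h
    · exact hWnn q h
    · simp only [List.mem_cons, List.not_mem_nil, or_false] at h
      subst h
      simp only
      omega
  have hcovT : ∀ x, v < x →
      pvCov k (pvTrimW k W1) x = pvCov k W x + (if x - k < v then c - S else 0) := by
    intro x hx
    rw [t3 x hx, hW1, pvCov_append_single]
  by_cases hfz : f v = 0
  · simp only [pvBulk]
    rw [if_pos hfz]
    apply hIH (pvTrimW k W1) f t2 hTnn t1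
    · intro x hx
      rw [hcovT x hx]
      have h1 := hreg x hx
      have h2 : c - S = 0 := by omega
      rw [h2]
      split <;> omega
    · exact fun x hx => hnn x (le_of_lt hx)
  · by_cases hphi : ∀ i ∈ PySem.List.pyRange 0 k 1, f v ≤ f (v + i)
    · simp only [pvBulk]
      rw [if_neg hfz, if_pos hphi]
      apply hIH (pvTrimW k W1) (pvSub v (PySem.List.pyRange 0 k 1) (f v) f) t2 hTnn t1
      · intro x hx
        have hmem := pvMemWindow k v x hx
        have h1 := hreg x hx
        simp only [pvSub]
        rw [hcovT x hx]
        by_cases hw : x - k < v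
        · rw [if_pos (hmem.mpr hw), if_pos hw]
          omega
        · rw [if_neg (fun hm => hw (hmem.mp hm)), if_neg hw]
          omega
      · intro x hx
        have hmem := pvMemWindow k v x hx
        simp only [pvSub]
        by_cases hw : x - k < v
        · rw [if_pos (hmem.mpr hw)]
          have hphx := hphi (x - v)
            (PySem.List.mem_pyRange_one.mpr ⟨by omega, by omega⟩)
          rw [show v + (x - v) = x by omega] at hphx
          omega
        · rw [if_neg (fun hm => hw (hmem.mp hm))]
          exact hnn x (le_of_lt hx)
    · simp only [pvBulk]
      rw [if_neg hfz, if_neg hphi]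
      refine (pvDoom k hk rs' (pvTrimW k W1) (some v) t2 hTnn
        (fun p' hp' => by injection hp' with h; subst h; exact t1)
        (fun h => by cases h)
        hrs1 hrs2
        (fun q hq r hr => by injection hr with h; subst h; exact hrs3 q hq)
        ?_).symm
      push_neg at hphi
      obtain ⟨i, hi, hlt⟩ := hphi
      rcases PySem.List.mem_pyRange_one.mp hi with ⟨hi0, hik⟩
      have hi1 : i ≠ 0 := by
        intro h
        subst h
        rw [add_zero] at hlt
        omega
      refine ⟨v + i, fun r hr => by injection hr with h; omega, ?_⟩
      rw [hcovT (v + i) (by omega), if_pos (by omega)]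
      have h1 := hreg (v + i) (by omega)
      omega

-- the bulk greedy equals the sweep
theorem pvMainB (k : Int) (hk : 1 ≤ k) :
    ∀ (rs W : List (Int × Int)) (f : Int → Int) (prev : Option Int),
      ((W.length : Int) ≤ k - 1) →
      (∀ p ∈ W, 0 ≤ p.2) →
      (∀ p : Int, prev = some p → W.map Prod.fst = intsFrom (p + 1 - W.length) W.length) →
      (prev = none → W = []) →
      (∀ p ∈ rs, 1 ≤ p.2) →
      List.Pairwise (fun p q : Int × Int => p.1 < q.1) rs →
      (∀ p ∈ rs, pvAfter prev p.1) →
      (∀ x, pvAfter prev x → f x = pvCnt rs x - pvCov k W x) →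
      (∀ x, pvAfter prev x → 0 ≤ f x) →
      pvBulk k rs f = pvSweepGo k rs (W.map Prod.snd) ((W.map Prod.snd).sum) prev := by
  intro rs
  induction rs with
  | nil =>
    intro W f prev hlen hnn hfst h0 _ _ _ hreg hfnn
    cases prev with
    | none =>
      rw [h0 rfl]
      rfl
    | some p =>
      have hfst' := hfst p rfl
      have hcovp : pvCov k W (p + 1) = (W.map Prod.snd).sum := by
        apply pvCov_eq_sum
        intro q hq
        have hm : q.1 ∈ W.map Prod.fst := List.mem_map_of_mem hq
        rw [hfst'] at hm
        have := mem_intsFrom _ _ _ hm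
        omega
      have hap : pvAfter (some p) (p + 1) := fun r hr => by injection hr with h; omega
      have h1 := hreg (p + 1) hap
      have h2 := hfnn (p + 1) hap
      have h3 : pvCnt [] (p + 1) = 0 := rfl
      have h4 := pvSumSnd_nonneg W hnn
      have hsum : (W.map Prod.snd).sum = 0 := by omega
      simp only [pvBulk, pvSweepGo, hsum]
      rfl
  | cons q rs' ih =>
    intro W f prev hlen hnn hfst h0 hcnt hpair hafter hreg hfnn
    obtain ⟨v, c⟩ := q
    have hc : 1 ≤ c := hcnt (v, c) List.mem_cons_self
    have hcnt' : ∀ p ∈ rs', 1 ≤ p.2 := fun p hp => hcnt p (List.mem_cons_of_mem _ hp)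
    have hhead : ∀ p ∈ rs', v < p.1 := fun p hp => (List.pairwise_cons.mp hpair).1 p hp
    have hpair' := (List.pairwise_cons.mp hpair).2
    have hcrs : pvCnt rs' v = 0 :=
      pvCnt_eq_zero rs' v (fun q hq => by have := hhead q hq; omega)
    have hcntv : ∀ x, pvCnt ((v, c) :: rs') x = (if x = v then c else 0) + pvCnt rs' x :=
      fun x => rfl
    have hIH : ∀ (W' : List (Int × Int)) (f' : Int → Int),
        ((W'.length : Int) ≤ k - 1) → (∀ p ∈ W', 0 ≤ p.2) →
        (W'.map Prod.fst = intsFrom (v + 1 - W'.length) W'.length) →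
        (∀ x, v < x → f' x = pvCnt rs' x - pvCov k W' x) →
        (∀ x, v < x → 0 ≤ f' x) →
        pvBulk k rs' f' = pvSweepGo k rs' (W'.map Prod.snd) ((W'.map Prod.snd).sum) (some v) := by
      intro W' f' hl hn hf hr hn2
      exact ih W' f' (some v) hl hn
        (fun p' hp' => by injection hp' with h; subst h; exact hf)
        (fun h => by cases h)
        hcnt' hpair'
        (fun q hq r hr' => by injection hr' with h; subst h; exact hhead q hq)
        (fun x hx => hr x (hx v rfl))
        (fun x hx => hn2 x (hx v rfl))
    cases prev with
    | none =>
      have hW := h0 rfl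
      subst hW
      have hreg' : ∀ x, f x = pvCnt ((v, c) :: rs') x - pvCov k [] x :=
        fun x => hreg x (fun r hr => by cases hr)
      have hfnn' : ∀ x, 0 ≤ f x := fun x => hfnn x (fun r hr => by cases hr)
      have hstep := pvStep k hk v c rs' [] f hIH hcnt' hpair' hhead
        (by simp; omega) (by simp) (by simp [intsFrom])
        (by
          have := hreg' v
          rw [hcntv v, if_pos rfl] at this
          simp only [pvCov, List.map_nil, List.sum_nil] at this ⊢
          omega)
        (fun x hx => by
          have := hreg' x
          rw [hcntv x, if_neg (by omega : ¬ x = v)] at this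
          simp only [pvCov, List.map_nil, List.sum_nil] at this ⊢
          omega)
        (fun x _ => hfnn' x)
      simp only [List.map_nil, List.sum_nil, sub_zero, List.nil_append] at hstep
      simp only [pvSweepGo, List.map_nil, List.sum_nil]
      simp only [Bool.true_and, decide_eq_true_eq]
      rw [if_neg (by omega : ¬ (0:Int) < 0)]
      rw [if_neg (by omega : ¬ c < (0:Int))]
      simp only [if_true, List.nil_append, sub_zero]
      rw [show ([c] : List Int) = ([(v, c)] : List (Int × Int)).map Prod.snd from rfl,
          pvTrim_bridge k [(v, c)] c]
      simp only [List.map_cons, List.map_nil, List.sum_cons, List.sum_nil, add_zero]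
      rw [sub_sub_cancel]
      exact hstep
    | some p =>
      have hfst' := hfst p rfl
      have hpv : p < v := hafter (v, c) List.mem_cons_self p rfl
      by_cases hgap : v = p + 1
      · have hgb : (decide (¬ v = p + 1)) = false := by simp [hgap]
        have hcovv : pvCov k W v = (W.map Prod.snd).sum := by
          apply pvCov_eq_sum
          intro q hq
          have hm : q.1 ∈ W.map Prod.fst := List.mem_map_of_mem hq
          rw [hfst'] at hm
          have := mem_intsFrom _ _ _ hm
          omega
        have hav : pvAfter (some p) v := fun r hr => by injection hr with h; omega
        have hfveq : f v = c - (W.map Prod.snd).sum := by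
          have := hreg v hav
          rw [hcntv v, if_pos rfl, hcovv] at this
          omega
        have hfvnn := hfnn v hav
        simp only [pvSweepGo, hgb, Bool.false_and, Bool.false_eq_true, if_false]
        rw [if_neg (by omega : ¬ c < (W.map Prod.snd).sum)]
        rw [show W.map Prod.snd ++ [c - (W.map Prod.snd).sum]
              = (W ++ [(v, c - (W.map Prod.snd).sum)]).map Prod.snd by simp,
            pvTrim_bridge k (W ++ [(v, c - (W.map Prod.snd).sum)]) c]
        have hsum1 : ((W ++ [(v, c - (W.map Prod.snd).sum)]).map Prod.snd).sum = c := by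
          simp only [List.map_append, List.sum_append, List.map_cons, List.map_nil,
            List.sum_cons, List.sum_nil]
          omega
        simp only [hsum1, sub_sub_cancel]
        exact pvStep k hk v c rs' W f hIH hcnt' hpair' hhead hlen hnn
          (by
            have : v - (W.length : Int) = p + 1 - W.length := by omega
            rw [this]
            exact hfst')
          hfveq
          (fun x hx => by
            have := hreg x (fun r hr => by injection hr with h; omega)
            rw [hcntv x, if_neg (by omega : ¬ x = v)] at this
            omega)
          (fun x hx => hfnn x (fun r hr => by injection hr with h; omega))
      · have hgb : (decide (¬ v = p + 1)) = true := by simp [hgap]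
        have hap : pvAfter (some p) (p + 1) := fun r hr => by injection hr with h; omega
        have hcovp : pvCov k W (p + 1) = (W.map Prod.snd).sum := by
          apply pvCov_eq_sum
          intro q hq
          have hm : q.1 ∈ W.map Prod.fst := List.mem_map_of_mem hq
          rw [hfst'] at hm
          have := mem_intsFrom _ _ _ hm
          omega
        have hS0 : (W.map Prod.snd).sum = 0 := by
          have h1 := hreg (p + 1) hap
          have h2 := hfnn (p + 1) hap
          have h3 : pvCnt ((v, c) :: rs') (p + 1) = 0 := by
            rw [hcntv, if_neg (by omega : ¬ (p + 1 : Int) = v),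
                pvCnt_eq_zero rs' (p + 1) (fun q hq => by have := hhead q hq; omega)]
            omega
          have h4 := pvSumSnd_nonneg W hnn
          omega
        have hcovz : ∀ x, pvCov k W x = 0 := fun x =>
          le_antisymm (hS0 ▸ pvCov_le_sum k W hnn x) (pvCov_nonneg k W hnn x)
        have hstep := pvStep k hk v c rs' [] f hIH hcnt' hpair' hhead
          (by simp; omega) (by simp) (by simp [intsFrom])
          (by
            have := hreg v (fun r hr => by injection hr with h; omega)
            rw [hcntv v, if_pos rfl, hcovz v] at this
            simp only [List.map_nil, List.sum_nil]
            omega)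
          (fun x hx => by
            have := hreg x (fun r hr => by injection hr with h; omega)
            rw [hcntv x, if_neg (by omega : ¬ x = v), hcovz x] at this
            simp only [pvCov, List.map_nil, List.sum_nil]
            omega)
          (fun x hx => hfnn x (fun r hr => by injection hr with h; omega))
        simp only [List.map_nil, List.sum_nil, sub_zero, List.nil_append] at hstep
        simp only [pvSweepGo, hgb, Bool.true_and, hS0]
        simp only [decide_eq_true_eq]
        rw [if_neg (by omega : ¬ (0:Int) < 0)]
        rw [if_neg (by omega : ¬ c < (0:Int))]
        simp only [if_true, List.nil_append, sub_zero]
        rw [show ([c] : List Int) = ([(v, c)] : List (Int × Int)).map Prod.snd from rfl,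
            pvTrim_bridge k [(v, c)] c]
        simp only [List.map_cons, List.map_nil, List.sum_cons, List.sum_nil, add_zero]
        rw [sub_sub_cancel]
        exact hstep

-- ===== VERDICT (by name: the statement is the Claim_ definition above) =====
theorem canArrangeBooks_spec : Claim_equal_canArrangeBooks := by
  unfold Claim_equal_canArrangeBooks
  intro books shelfSize _ hpre
  unfold Spec_canArrangeBooks canArrangeBooks canArrangeBooks_alt
  split
  · rfl
  · rw [pvLoopA_bridge]
    rcases (by omega : shelfSize ≤ 0 ∨ 0 < shelfSize) with hk | hk
    · rw [pvRunA_nonpos shelfSize hk,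
          pvSweep_nonpos shelfSize hk _
            (fun p hp => le_trans (by omega) (pvRLE_pos _ p hp)) none]
    · have hsp := PySem.List.sorted_pairwise books (fun x => x)
      have hcount : ∀ x : Int,
          (PySem.Dict.counter books).getD x 0
            = ((PySem.List.sorted books (fun x => x) false).count x : Int) := by
        intro x
        rw [PySem.Dict.getD_counter,
            (PySem.List.sorted_perm books (fun x => x) false).count_eq]
      set bs := PySem.List.sorted books (fun x => x) false with hbs
      rcases pvRLE_sorted_props bs.length bs (le_refl _) hsp with ⟨hasc, hcnt⟩
      rw [pvMainA shelfSize hk bs.length bs _ (le_refl _) hsp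
            (fun x => by rw [hcount x]; exact Int.natCast_nonneg _)
            (fun x => by rw [hcount x])]
      have := pvMainB shelfSize (by omega) (pvRLE bs) [] (fun x => (bs.count x : Int)) none
        (by simp; omega) (by simp)
        (by intro p hp; cases hp) (fun _ => rfl)
        (pvRLE_pos bs) hasc
        (fun p _ q hq => by cases hq)
        (fun x _ => by rw [hcnt x]; simp [pvCov])
        (fun x _ => Int.natCast_nonneg _)
      simp only [List.map_nil, List.sum_nil] at this
      rw [← this]
      congr 1
      funext x
      rw [hcount x]
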